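-- pv_equiv track=rewrite | github.com/cod2048/Algorithm_auto | 프로그래머스/2/60057. 문자열 압축/문자열 압축.py | solution
-- ===== SOURCE A (Python) =====
-- def solution(s):
--     answer = len(s)
--     # 문자열길이의 절반 + 1까지 반복이 가능한지 검사
--     # 제일 짧은 변수를 문자열 길이로 초기화
--     # 더 짧은걸 찾으면 갱신
--     for x in range(1, len(s) // 2 + 1):
--         comp_len = 0
--         comp = ''
--         cnt = 1
--         for i in range(0, len(s) + 1, x):
--             tmp = s[i:i + x]
--             if comp == tmp:
--                 cnt += 1
--             elif comp != tmp:
--                 comp_len += len(tmp)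
--                 if cnt > 1:
--                     comp_len += len(str(cnt))
--                 cnt = 1
--                 comp = tmp
--         answer = min(answer, comp_len)
--
--     return answer
-- ===== SOURCE B (Python) =====
-- def solution(s):
--     n = len(s)
--     best = n
--     for x in range(1, n // 2 + 1):
--         q, r = divmod(n, x)
--         # boundary j (1 <= j < q) is a "break" iff full chunk j-1 differs from
--         # full chunk j, detected by comparing s with its x-shift character-wise
--         breaks = [j for j in range(1, q)
--                   if any(s[i] != s[i + x] for i in range((j - 1) * x, j * x))]
--         pts = [0] + breaks + [q]
--         total = r + sum(x + (len(str(b - a)) if b - a > 1 else 0)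
--                         for a, b in zip(pts, pts[1:]))
--         if total < best:
--             best = total
--     return best
-- ===== Notes on version B (the rewrite author's own statement) =====
-- stated objective: alternative
-- what changed: A slices the string into chunks and streams them through (comp, cnt, comp_len) run-length state with a sentinel flush; B builds no chunk strings at all: it finds run boundaries by comparing s with its x-shift character-wise, collects the break positions, and sums closed-form run costs over consecutive differences of the breakpoint list.
import Mathlib
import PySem

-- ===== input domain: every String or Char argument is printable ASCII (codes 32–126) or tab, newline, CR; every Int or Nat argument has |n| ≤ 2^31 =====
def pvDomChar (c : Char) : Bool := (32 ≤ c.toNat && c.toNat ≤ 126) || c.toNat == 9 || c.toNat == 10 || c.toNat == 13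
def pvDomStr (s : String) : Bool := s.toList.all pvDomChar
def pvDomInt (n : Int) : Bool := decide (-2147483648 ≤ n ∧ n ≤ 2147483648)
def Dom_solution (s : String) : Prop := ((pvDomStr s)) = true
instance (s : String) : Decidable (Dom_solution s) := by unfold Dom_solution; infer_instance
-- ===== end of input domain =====

-- B replaces A's chunk-slicing run-length stream (comp, cnt, comp_len with sentinel flush) by a
-- breakpoint computation: character-wise comparison of s with its x-shift finds the run boundaries,
-- and the total is summed from consecutive differences of the breakpoint list; objective: alternative.

-- ===== PORT A =====
-- one step of A's inner loop: state = (comp, cnt, comp_len), incoming chunk = tmp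
def stepA (st : String × Int × Int) (tmp : String) : String × Int × Int :=
  if st.1 == tmp then (st.1, st.2.1 + 1, st.2.2)
  else (tmp, 1, st.2.2 + PySem.Str.len tmp
    + (if st.2.1 > 1 then PySem.Str.len (PySem.Int.toStr st.2.1) else 0))

-- A's inner loop for one chunk size x: comp_len after the fold over i in range(0, len(s)+1, x)
def innerA (s : String) (x : Int) : Int :=
  ((PySem.List.pyRange 0 (PySem.Str.len s + 1) x).foldl
    (fun st i => stepA st (PySem.Str.slice s (some i) (some (i + x)))) ("", 1, 0)).2.2

def solution (s : String) : Int :=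
  (PySem.List.pyRange 1 (PySem.Int.floordiv (PySem.Str.len s) 2 + 1) 1).foldl
    (fun answer x => min answer (innerA s x)) (PySem.Str.len s)

-- ===== PORT B =====
-- any(s[i] != s[i + x] for i in range((j - 1) * x, j * x))
def chunkNeqB (s : String) (x j : Int) : Bool :=
  (PySem.List.pyRange ((j - 1) * x) (j * x) 1).any
    (fun i => !(PySem.Str.pyGet? s i == PySem.Str.pyGet? s (i + x)))

-- B's inner computation for one chunk size x: breakpoint list, then the closed-form sum over
-- consecutive differences of pts = [0] + breaks + [q]
def innerB (s : String) (x : Int) : Int :=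
  let q := PySem.Int.floordiv (PySem.Str.len s) x
  let r := PySem.Int.mod (PySem.Str.len s) x
  let breaks := (PySem.List.pyRange 1 q 1).filter (fun j => chunkNeqB s x j)
  let pts : List Int := 0 :: (breaks ++ [q])
  r + ((pts.zip (PySem.List.slice pts (some 1) none)).map
        (fun ab => x + (if ab.2 - ab.1 > 1 then PySem.Str.len (PySem.Int.toStr (ab.2 - ab.1)) else 0))).sum

def solution_alt (s : String) : Int :=
  (PySem.List.pyRange 1 (PySem.Int.floordiv (PySem.Str.len s) 2 + 1) 1).foldl
    (fun best x => let total := innerB s x; if total < best then total else best)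
    (PySem.Str.len s)

-- ===== PRECONDITION & SPEC =====
def Spec_solution (s : String) (out : Int) : Prop := out = solution_alt s
instance (s : String) (out : Int) : Decidable (Spec_solution s out) := by unfold Spec_solution; infer_instance

-- ===== CLAIM (what is proved, stated in full; the proofs are below) =====
def Claim_equal_solution : Prop := ∀ (s : String), Dom_solution s → Spec_solution s (solution s)

-- ===== LEMMAS AND PROOFS =====

-- digit-count term charged for a run of length cnt
def digitsIf (cnt : Int) : Int :=
  if cnt > 1 then PySem.Str.len (PySem.Int.toStr cnt) else 0

-- characterisation of A's streaming state machine
def F : List String → String → Int → Int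
  | [], _, _ => 0
  | c :: cs, comp, cnt =>
      if comp == c then F cs comp (cnt + 1)
      else PySem.Str.len c + digitsIf cnt + F cs c 1

-- reference value both sides are reduced to: run-length cost of a chunk list
def rleLen : List String → Int
  | [] => 0
  | c :: rest =>
      PySem.Str.len c
        + digitsIf (((rest.takeWhile (· == c)).length : Int) + 1)
        + rleLen (rest.dropWhile (· == c))
termination_by l => l.length
decreasing_by simpa using Nat.lt_succ_of_le (List.length_dropWhile_le _ _)

-- the chunk list [s[i:i+x] for i in range(0, n, x)]
def chunksB (s : String) (x : Int) : List String :=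
  (PySem.List.pyRange 0 (PySem.Str.len s) x).map
    (fun i => PySem.Str.slice s (some i) (some (i + x)))

-- the k-th chunk of size X
def gch (s : String) (X k : ℕ) : String :=
  PySem.Str.slice s (some ((X * k : ℕ) : Int)) (some (((X * k : ℕ) : Int) + (X : ℕ)))

-- B's breakpoint list, structurally: positions p+1, p+2, … of adjacent-unequal pairs
def bks : List String → Int → List Int
  | [], _ => []
  | [_], _ => []
  | a :: b :: rest, p =>
      if a == b then bks (b :: rest) (p + 1) else (p + 1) :: bks (b :: rest) (p + 1)

-- B's closed-form sum over consecutive differences, structurally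
def ptsSum (x : Int) : Int → List Int → Int
  | _, [] => 0
  | a, b :: rest => x + digitsIf (b - a) + ptsSum x b rest

lemma foldl_stepA (ds : List String) : ∀ (comp : String) (cnt acc : Int),
    (ds.foldl stepA (comp, cnt, acc)).2.2 = acc + F ds comp cnt := by
  induction ds with
  | nil => intro comp cnt acc; simp [F]
  | cons c cs ih =>
      intro comp cnt acc
      rw [List.foldl_cons]
      by_cases h : (comp == c) = true
      · rw [stepA, if_pos h, ih, F, if_pos h]
      · rw [stepA, if_neg h, ih, F, if_neg h, digitsIf]
        ring_nf

lemma F_run (ys : List String) (c : String) : ∀ (zs : List String) (m : Int),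
    (∀ y ∈ ys, y = c) → F (ys ++ zs) c m = F zs c (m + (ys.length : Int)) := by
  induction ys with
  | nil => intro zs m _; simp
  | cons y ys ih =>
      intro zs m hall
      have hy : y = c := hall y (by simp)
      rw [List.cons_append, F, if_pos (by simp [hy])]
      rw [ih zs (m + 1) (fun z hz => hall z (by simp [hz])), List.length_cons]
      push_cast
      ring_nf

lemma getLast?_all_eq (c : String) : ∀ (tw : List String), (∀ y ∈ tw, y = c) →
    (c :: tw).getLast? = some c := by
  intro tw
  induction tw generalizing c with
  | nil => intro _; rfl
  | cons y tw ih =>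
      intro hall
      have hy : y = c := hall y (by simp)
      rw [List.getLast?_cons_cons, hy]
      exact ih c (fun z hz => hall z (by simp [hz]))

lemma rleLen_cons (c : String) (rest : List String) :
    rleLen (c :: rest) = PySem.Str.len c
      + digitsIf (((rest.takeWhile (· == c)).length : Int) + 1)
      + rleLen (rest.dropWhile (· == c)) := by
  rw [rleLen]

lemma F_concat (N : Nat) : ∀ (cs : List String) (t comp : String) (cnt : Int),
    cs.length ≤ N →
    cs.getLast? ≠ some t →
    (cs ++ [t]).head? ≠ some comp →
    F (cs ++ [t]) comp cnt = digitsIf cnt + rleLen cs + PySem.Str.len t := by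
  induction N with
  | zero =>
      intro cs t comp cnt hlen _ hH
      have hcs : cs = [] := List.eq_nil_of_length_eq_zero (Nat.le_zero.mp hlen)
      subst hcs
      have ht : ¬ (comp == t) = true := by
        simp only [List.nil_append, List.head?_cons, ne_eq, Option.some.injEq] at hH
        simp only [beq_iff_eq]; exact fun h => hH h.symm
      rw [List.nil_append, F, if_neg ht, F, rleLen]
      ring_nf
  | succ N ih =>
      intro cs t comp cnt hlen hL hH
      match cs with
      | [] =>
          have ht : ¬ (comp == t) = true := by
            simp only [List.nil_append, List.head?_cons, ne_eq, Option.some.injEq] at hH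
            simp only [beq_iff_eq]; exact fun h => hH h.symm
          rw [List.nil_append, F, if_neg ht, F, rleLen]
          ring_nf
      | c :: cs' =>
          have hcomp : ¬ (comp == c) = true := by
            simp only [List.cons_append, List.head?_cons, ne_eq, Option.some.injEq] at hH
            simp only [beq_iff_eq]; exact fun h => hH h.symm
          rw [List.cons_append, F, if_neg hcomp]
          set tw := cs'.takeWhile (· == c) with htw_def
          set dw := cs'.dropWhile (· == c) with hdw_def
          have htw : ∀ y ∈ tw, y = c := fun y hy => by
            have h := List.mem_takeWhile_imp (p := (· == c)) hy; simpa using h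
          have hsplit : tw ++ dw = cs' := List.takeWhile_append_dropWhile
          have hFtw : F (cs' ++ [t]) c 1 = F (dw ++ [t]) c (1 + (tw.length : Int)) := by
            rw [← hsplit, List.append_assoc]
            exact F_run tw c (dw ++ [t]) 1 htw
          rw [hFtw, rleLen_cons, ← htw_def, ← hdw_def]
          by_cases hdw : dw = []
          · have hcs' : cs' = tw := by rw [← hsplit, hdw]; simp
            have htc : ¬ (c == t) = true := by
              have hgl := getLast?_all_eq c tw htw
              rw [hcs'] at hL
              simp only [beq_iff_eq]
              exact fun h => hL (hgl.trans (by rw [h]))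
            rw [hdw, List.nil_append, F, if_neg htc, F, rleLen]
            ring_nf
          · obtain ⟨d, rest, hdeq⟩ := List.exists_cons_of_ne_nil hdw
            have hdne : cs'.dropWhile (· == c) ≠ [] := by rw [← hdw_def]; exact hdw
            have hdc : ¬ (d == c) = true := by
              have h1 := List.head_dropWhile_not (· == c) (l := cs') hdne
              have h2 : (cs'.dropWhile (· == c)).head? = some d := by
                rw [← hdw_def, hdeq]; rfl
              rw [List.head?_eq_some_head hdne] at h2
              have h3 : (cs'.dropWhile (· == c)).head hdne = d := by
                exact Option.some.inj h2
              rw [h3] at h1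
              simp [h1]
            have hlen' : dw.length ≤ N := by
              have h1 : dw.length ≤ cs'.length := List.length_dropWhile_le _ _
              simp only [List.length_cons] at hlen
              omega
            have hglapp : (c :: cs').getLast? = dw.getLast? := by
              conv_lhs => rw [← hsplit, ← List.cons_append]
              rw [List.getLast?_append, hdeq]
              cases hgl : (d :: rest).getLast? with
              | none => exact absurd (List.getLast?_eq_none_iff.mp hgl) (by simp)
              | some z => simp
            have hL' : dw.getLast? ≠ some t := by rw [← hglapp]; exact hL
            have hH' : (dw ++ [t]).head? ≠ some c := by
              rw [hdeq, List.cons_append, List.head?_cons]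
              simp only [beq_iff_eq] at hdc
              simp only [ne_eq, Option.some.injEq]
              exact hdc
            rw [ih dw t c (1 + (tw.length : Int)) hlen' hL' hH']
            ring_nf

lemma rleLen_concat (N : Nat) : ∀ (cs : List String) (t : String),
    cs.length ≤ N →
    cs.getLast? ≠ some t →
    rleLen (cs ++ [t]) = rleLen cs + PySem.Str.len t := by
  induction N with
  | zero =>
      intro cs t hlen _
      have hcs : cs = [] := List.eq_nil_of_length_eq_zero (Nat.le_zero.mp hlen)
      subst hcs
      rw [List.nil_append, rleLen_cons, rleLen]
      simp [digitsIf, rleLen]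
  | succ N ih =>
      intro cs t hlen hL
      match cs with
      | [] =>
          rw [List.nil_append, rleLen_cons, rleLen]
          simp [digitsIf, rleLen]
      | c :: cs' =>
          rw [List.cons_append, rleLen_cons, rleLen_cons]
          set tw := cs'.takeWhile (· == c) with htw_def
          set dw := cs'.dropWhile (· == c) with hdw_def
          have htw : ∀ y ∈ tw, y = c := fun y hy => by
            have h := List.mem_takeWhile_imp (p := (· == c)) hy; simpa using h
          have htwb : ∀ y ∈ tw, (y == c) = true := fun y hy => by simp [htw y hy]
          have hsplit : tw ++ dw = cs' := List.takeWhile_append_dropWhile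
          by_cases hdw : dw = []
          · have hcs' : cs' = tw := by rw [← hsplit, hdw]; simp
            have htc : ¬ (t == c) = true := by
              have hgl := getLast?_all_eq c tw htw
              rw [hcs'] at hL
              simp only [beq_iff_eq]
              exact fun h => hL (hgl.trans (by rw [h]))
            have h1 : (cs' ++ [t]).takeWhile (· == c) = tw := by
              conv_lhs => rw [hcs']
              rw [List.takeWhile_append_of_pos htwb, List.takeWhile_cons_of_neg (by simpa using htc)]
              simp
            have h2 : (cs' ++ [t]).dropWhile (· == c) = [t] := by
              conv_lhs => rw [hcs']
              rw [List.dropWhile_append_of_pos htwb, List.dropWhile_cons_of_neg (by simpa using htc)]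
            rw [h1, h2, hdw]
            simp [rleLen, digitsIf]
          · obtain ⟨d, rest, hdeq⟩ := List.exists_cons_of_ne_nil hdw
            have hdne : cs'.dropWhile (· == c) ≠ [] := by rw [← hdw_def]; exact hdw
            have hdc : ¬ (d == c) = true := by
              have h1 := List.head_dropWhile_not (· == c) (l := cs') hdne
              have h2 : (cs'.dropWhile (· == c)).head? = some d := by
                rw [← hdw_def, hdeq]; rfl
              rw [List.head?_eq_some_head hdne] at h2
              rw [Option.some.inj h2] at h1
              simp [h1]
            have h1 : (cs' ++ [t]).takeWhile (· == c) = tw := by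
              conv_lhs => rw [← hsplit, List.append_assoc]
              rw [List.takeWhile_append_of_pos htwb, hdeq, List.cons_append,
                  List.takeWhile_cons_of_neg (by simpa using hdc)]
              simp
            have h2 : (cs' ++ [t]).dropWhile (· == c) = dw ++ [t] := by
              conv_lhs => rw [← hsplit, List.append_assoc]
              rw [List.dropWhile_append_of_pos htwb, hdeq, List.cons_append,
                  List.dropWhile_cons_of_neg (by simpa using hdc)]
            have hlen' : dw.length ≤ N := by
              have h3 : dw.length ≤ cs'.length := List.length_dropWhile_le _ _
              simp only [List.length_cons] at hlen
              omega
            have hglapp : (c :: cs').getLast? = dw.getLast? := by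
              conv_lhs => rw [← hsplit, ← List.cons_append]
              rw [List.getLast?_append, hdeq]
              cases hgl : (d :: rest).getLast? with
              | none => exact absurd (List.getLast?_eq_none_iff.mp hgl) (by simp)
              | some z => simp
            have hL' : dw.getLast? ≠ some t := by rw [← hglapp]; exact hL
            rw [h1, h2, ih dw t hlen' hL']
            ring_nf

lemma chunk_toList (s : String) (I X : Nat) :
    (PySem.Str.slice s (some (I : Int)) (some ((I : Int) + (X : Int)))).toList
      = (s.toList.drop I).take X := by
  rw [PySem.Str.toList_slice, PySem.Chars.slice_eq_listSlice,
      PySem.List.slice_toNat _ (by positivity) (by positivity)]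
  congr 1
  omega

lemma chunk_len (s : String) (I X : Nat) :
    ((PySem.Str.slice s (some (I : Int)) (some ((I : Int) + (X : Int)))).toList).length
      = min (I + X) s.toList.length - I := by
  rw [chunk_toList]
  simp [List.length_take, List.length_drop]
  omega

-- shapes of the two index ranges: A's range(0, n+1, x) has ceil((n+1)/x) = n//x + 1 elements

lemma countA (N X : Nat) (hx : 1 ≤ X) :
    (if (0:Int) < (N:Int) + 1 then (((N:Int) + 1 - 0 + (X:Int) - 1) / (X:Int)).toNat else 0)
      = N / X + 1 := by
  rw [if_pos (by omega)]
  have h1 : ((N:Int) + 1 - 0 + (X:Int) - 1) = ((N + X : Nat) : Int) := by push_cast; ring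
  rw [h1, ← Int.natCast_div, Int.toNat_natCast, Nat.add_div_right _ (by omega)]

lemma countB (N X : Nat) (hx : 1 ≤ X) (hN : 1 ≤ N) :
    (if (0:Int) < (N:Int) then (((N:Int) - 0 + (X:Int) - 1) / (X:Int)).toNat else 0)
      = N / X + (if N % X = 0 then 0 else 1) := by
  rw [if_pos (by omega)]
  have h1 : ((N:Int) - 0 + (X:Int) - 1) = ((N + X - 1 : Nat) : Int) := by omega
  rw [h1, ← Int.natCast_div, Int.toNat_natCast]
  have hd := Nat.div_add_mod N X
  by_cases hr : N % X = 0
  · have h2 : N + X - 1 = X * (N / X) + (X - 1) := by omega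
    rw [hr, if_pos rfl, h2, Nat.mul_add_div (by omega), Nat.div_eq_of_lt (show X - 1 < X by omega)]
  · have h2 : N + X - 1 = X * (N / X) + (N % X + X - 1) := by omega
    rw [if_neg hr, h2, Nat.mul_add_div (by omega)]
    congr 1
    have hrX : N % X < X := Nat.mod_lt _ (by omega)
    exact Nat.div_eq_of_lt_le (by omega) (by omega)

lemma ne_of_len_ne (a b : String) (h : a.toList.length ≠ b.toList.length) : a ≠ b :=
  fun he => h (by rw [he])

-- ===== B-side theory: breakpoints and the pts sum =====

lemma ptsSum_shift (x t : Int) : ∀ (l : List Int) (a : Int),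
    ptsSum x (a + t) (l.map (· + t)) = ptsSum x a l := by
  intro l
  induction l with
  | nil => intro a; simp [ptsSum]
  | cons b rest ih =>
      intro a
      rw [List.map_cons, ptsSum, ptsSum, ih]
      have h : b + t - (a + t) = b - a := by ring
      rw [h]

lemma sum_zip_eq_ptsSum (x : Int) : ∀ (l : List Int) (a : Int),
    (((a :: l).zip l).map
      (fun ab => x + (if ab.2 - ab.1 > 1 then PySem.Str.len (PySem.Int.toStr (ab.2 - ab.1)) else 0))).sum
      = ptsSum x a l := by
  intro l
  induction l with
  | nil => intro a; simp [ptsSum]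
  | cons b rest ih =>
      intro a
      rw [List.zip_cons_cons, List.map_cons, List.sum_cons, ih, ptsSum, digitsIf]

lemma bks_shift (l : List String) : ∀ (p t : Int), bks l (p + t) = (bks l p).map (· + t) := by
  induction l with
  | nil => intro p t; simp [bks]
  | cons a l ih =>
      intro p t
      cases l with
      | nil => simp [bks]
      | cons b r =>
          have h1 : p + t + 1 = (p + 1) + t := by ring
          by_cases h : (a == b) = true
          · rw [bks, if_pos h, bks, if_pos h, h1, ih]
          · rw [bks, if_neg h, bks, if_neg h, List.map_cons, h1, ih]

lemma bks_run (c : String) : ∀ (tw : List String) (dw : List String) (p : Int),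
    (∀ y ∈ tw, y = c) → dw.head? ≠ some c →
    bks (c :: (tw ++ dw)) p
      = if dw.isEmpty then [] else (p + (tw.length : Int) + 1) :: bks dw (p + (tw.length : Int) + 1) := by
  intro tw
  induction tw generalizing c with
  | nil =>
      intro dw p _ hd
      cases dw with
      | nil => simp [bks]
      | cons d r =>
          have hcd : ¬ (c == d) = true := by
            simp only [List.head?_cons, ne_eq, Option.some.injEq] at hd
            simp only [beq_iff_eq]; exact fun h => hd h.symm
          rw [List.nil_append, bks, if_neg hcd]
          simp
  | cons y tw' ih =>
      intro dw p hall hd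
      have hy : y = c := hall y (by simp)
      subst hy
      rw [List.cons_append, bks, if_pos (by simp)]
      rw [ih y dw (p + 1) (fun z hz => hall z (by simp [hz])) hd]
      have h1 : p + 1 + (tw'.length : Int) + 1 = p + ((tw'.length : Int) + 1) + 1 := by ring
      rw [List.length_cons]
      push_cast
      rw [h1]

lemma bks_range' (g : Nat → String) : ∀ (m a : Nat) (p : Int),
    bks ((List.range' a (m + 1)).map g) p
      = ((List.range m).filter (fun k => !(g (a + k) == g (a + k + 1)))).map
          (fun k : Nat => p + (k : Int) + 1) := by
  intro m
  induction m with
  | zero => intro a p; simp [List.range'_succ, bks]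
  | succ m ih =>
      intro a p
      have hL1 : (List.range' a (m + 1 + 1)).map g
          = g a :: g (a + 1) :: (List.range' (a + 1 + 1) m).map g := by
        rw [List.range'_succ, List.range'_succ, List.map_cons, List.map_cons]
      have hih := ih (a + 1) (p + 1)
      rw [List.range'_succ, List.map_cons] at hih
      have hpred : (List.range m).filter ((fun k => !(g (a + k) == g (a + k + 1))) ∘ Nat.succ)
          = (List.range m).filter (fun k => !(g (a + 1 + k) == g (a + 1 + k + 1))) := by
        apply List.filter_congr
        intro k _
        simp only [Function.comp_apply]
        have e1 : a + Nat.succ k = a + 1 + k := by omega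
        rw [e1]
      have hR : ((List.range (m + 1)).filter (fun k => !(g (a + k) == g (a + k + 1)))).map
            (fun k : Nat => p + (k : Int) + 1)
          = (if (g a == g (a + 1)) = true then ([] : List Int) else [p + 1])
            ++ ((List.range m).filter (fun k => !(g (a + 1 + k) == g (a + 1 + k + 1)))).map
                (fun k : Nat => p + 1 + (k : Int) + 1) := by
        rw [List.range_succ_eq_map, List.filter_cons, List.filter_map]
        have hmap2 : List.map ((fun k : Nat => p + (k : Int) + 1) ∘ Nat.succ)
              ((List.range m).filter (fun k => !(g (a + 1 + k) == g (a + 1 + k + 1))))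
            = List.map (fun k : Nat => p + 1 + (k : Int) + 1)
              ((List.range m).filter (fun k => !(g (a + 1 + k) == g (a + 1 + k + 1)))) :=
          List.map_congr_left (fun k _ => by simp only [Function.comp_apply]; push_cast; ring)
        by_cases h : (g a == g (a + 1)) = true
        · rw [if_neg (by simp [h]), if_pos h, List.nil_append, List.map_map, hpred, hmap2]
        · rw [if_pos (by simp [h]), if_neg h, List.map_cons, List.map_map, hpred, hmap2]
          simp
      rw [hL1, hR]
      by_cases h : (g a == g (a + 1)) = true
      · rw [bks, if_pos h, hih, if_pos h, List.nil_append]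
      · rw [bks, if_neg h, hih, if_neg h]
        rfl

-- agreement of the breakpoint cost sum with rleLen on a nonempty list of chunks all of length x
lemma core (x : Int) : ∀ (N : Nat) (cs : List String), cs.length ≤ N → cs ≠ [] →
    (∀ c ∈ cs, PySem.Str.len c = x) →
    ptsSum x 0 (bks cs 0 ++ [(cs.length : Int)]) = rleLen cs := by
  intro N
  induction N with
  | zero =>
      intro cs hlen hne _
      cases cs with
      | nil => exact absurd rfl hne
      | cons c rest => simp at hlen
  | succ N ih =>
      intro cs hlen hne hall
      match cs with
      | [] => exact absurd rfl hne
      | c :: rest =>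
          set tw := rest.takeWhile (· == c) with htw_def
          set dw := rest.dropWhile (· == c) with hdw_def
          have htw : ∀ y ∈ tw, y = c := fun y hy => by
            have h := List.mem_takeWhile_imp (p := (· == c)) hy; simpa using h
          have htwb : ∀ y ∈ tw, (y == c) = true := fun y hy => by simp [htw y hy]
          have hsplit : tw ++ dw = rest := List.takeWhile_append_dropWhile
          have hhd : dw.head? ≠ some c := by
            cases hdwe : dw with
            | nil => simp
            | cons d r =>
                have hdne : rest.dropWhile (· == c) ≠ [] := by
                  rw [← hdw_def, hdwe]; simp
                have h1 := List.head_dropWhile_not (· == c) (l := rest) hdne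
                have h2 : (rest.dropWhile (· == c)).head? = some d := by
                  rw [← hdw_def, hdwe]; rfl
                rw [List.head?_eq_some_head hdne] at h2
                rw [Option.some.inj h2] at h1
                simp only [List.head?_cons, ne_eq, Option.some.injEq]
                intro hdc
                rw [hdc] at h1
                simp at h1
          have hlenc : PySem.Str.len c = x := hall c (by simp)
          rw [show rest = tw ++ dw from hsplit.symm]
          rw [bks_run c tw dw 0 htw hhd]
          by_cases hdwe : dw = []
          · rw [hdwe, List.append_nil, List.isEmpty_nil, if_pos rfl, List.nil_append, rleLen_cons]
            rw [List.takeWhile_eq_self_iff.mpr (by simpa using htwb),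
                List.dropWhile_eq_nil_iff.mpr (by simpa using htwb)]
            rw [show rleLen [] = 0 from by simp [rleLen]]
            rw [ptsSum, ptsSum]
            have hL : (((c :: tw).length : Nat) : Int) - 0 = (tw.length : Int) + 1 := by
              simp
            rw [hL, hlenc]
          · rw [if_neg (by simpa [List.isEmpty_iff] using hdwe)]
            have ht1 : (0 : Int) + (tw.length : Int) + 1 = 0 + ((tw.length : Int) + 1) := by ring
            rw [ht1, bks_shift dw 0 ((tw.length : Int) + 1), List.cons_append]
            have hL : (((c :: (tw ++ dw)).length : Nat) : Int)
                = (dw.length : Int) + ((tw.length : Int) + 1) := by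
              simp
              ring
            rw [hL]
            rw [show ((dw.length : Int) + ((tw.length : Int) + 1))
                  = (fun y : Int => y + ((tw.length : Int) + 1)) ((dw.length : Int)) from rfl]
            rw [show ((bks dw 0).map (· + ((tw.length : Int) + 1)) ++
                    [(fun y : Int => y + ((tw.length : Int) + 1)) ((dw.length : Int))])
                  = ((bks dw 0) ++ [(dw.length : Int)]).map (· + ((tw.length : Int) + 1)) from by
              rw [List.map_append]; rfl]
            rw [ptsSum, ptsSum_shift x ((tw.length : Int) + 1)]
            have hdwsub : ∀ y ∈ dw, y ∈ c :: rest := by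
              intro y hy
              have : y ∈ rest := (List.dropWhile_sublist (· == c)).subset (hdw_def ▸ hy)
              simp [this]
            have hdwlen : dw.length ≤ N := by
              have h1 : dw.length ≤ rest.length := hdw_def ▸ List.length_dropWhile_le _ _
              simp only [List.length_cons] at hlen
              omega
            rw [ih dw hdwlen hdwe (fun y hy => hall y (hdwsub y hy))]
            rw [rleLen_cons]
            rw [List.takeWhile_append_of_pos htwb, List.dropWhile_append_of_pos htwb]
            obtain ⟨d, r, hdeq⟩ := List.exists_cons_of_ne_nil hdwe
            have hdc : ¬ (d == c) = true := by
              rw [hdeq] at hhd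
              simp only [List.head?_cons, ne_eq, Option.some.injEq] at hhd
              simp only [beq_iff_eq]
              exact hhd
            rw [hdeq, List.takeWhile_cons_of_neg (by simpa using hdc),
                List.dropWhile_cons_of_neg (by simpa using hdc), ← hdeq]
            rw [hlenc]
            have h0 : (0 : Int) + ((tw.length : Int) + 1) - 0
                = ((tw ++ []).length : Int) + 1 := by simp
            rw [h0]

lemma inner_eq (s : String) (X : Nat) (hx : 1 ≤ X) (hxn : 2 * X ≤ s.toList.length) :
    innerA s (X : Int) = rleLen (chunksB s (X : Int)) := by
  have hX0 : (0:Int) < (X:Int) := by exact_mod_cast hx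
  obtain ⟨N, hN⟩ : ∃ N, s.toList.length = N := ⟨_, rfl⟩
  have hlen : PySem.Str.len s = (N : Int) := by rw [PySem.Str.len_eq, hN]
  obtain ⟨f, hfd⟩ : ∃ f', f' = (fun i : Int => PySem.Str.slice s (some i) (some (i + (X:Int)))) :=
    ⟨_, rfl⟩
  have hf' : ∀ i : Int, PySem.Str.slice s (some i) (some (i + (X:Int))) = f i := by
    intro i; rw [hfd]
  obtain ⟨q, hq⟩ : ∃ q', N / X = q' := ⟨_, rfl⟩
  obtain ⟨r, hr⟩ : ∃ r', N % X = r' := ⟨_, rfl⟩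
  have hdm : X * q + r = N := by rw [← hq, ← hr]; exact Nat.div_add_mod N X
  have hrX : r < X := by rw [← hr]; exact Nat.mod_lt _ (by omega)
  have hq2 : 2 ≤ q := by rw [← hq, Nat.le_div_iff_mul_le (by omega)]; omega
  obtain ⟨g, hg⟩ : ∃ g', g' = (fun k : Nat => f (0 + (X:Int) * (k:Nat))) := ⟨_, rfl⟩
  have glen : ∀ k : Nat, (g k).toList.length = min (X*k + X) N - X*k := by
    intro k
    have hi : (0 + (X:Int) * ((k:Nat):Int)) = ((X*k : Nat) : Int) := by push_cast; ring
    rw [hg]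
    simp only [hfd, hi]
    rw [chunk_len s (X*k) X, hN]
  have hA : (PySem.List.pyRange 0 ((N:Int) + 1) (X:Int)).map f
      = (List.range q).map g ++ [g q] := by
    rw [PySem.List.pyRange_of_pos 0 ((N:Int)+1) hX0, countA N X hx, hq, List.map_map,
        List.range_succ, List.map_append]
    simp [hg, Function.comp]
  have hB : (PySem.List.pyRange 0 (N:Int) (X:Int)).map f
      = (List.range q).map g ++ (if r = 0 then [] else [g q]) := by
    rw [PySem.List.pyRange_of_pos 0 (N:Int) hX0, countB N X hx (by omega), hq, hr, List.map_map]
    by_cases h0 : r = 0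
    · rw [if_pos h0, if_pos h0, List.append_nil]
      simp [hg, Function.comp]
    · rw [if_neg h0, if_neg h0, List.range_succ, List.map_append]
      simp [hg, Function.comp]
  have hlenT : (g q).toList.length = r := by rw [glen q]; omega
  have hlenL : (g (q-1)).toList.length = X := by
    rw [glen (q-1)]
    have hstep : X * (q-1) + X = X * q := by
      cases q with
      | zero => omega
      | succ q' => simp [Nat.mul_succ]
    omega
  have hlenH : (g 0).toList.length = X := by rw [glen 0]; omega
  have hgl : ((List.range q).map g).getLast? = some (g (q-1)) := by
    obtain ⟨q', rfl⟩ : ∃ q', q = q' + 1 := ⟨q - 1, by omega⟩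
    rw [List.range_succ, List.map_append, List.map_singleton, List.getLast?_concat]
    simp
  have hhd : ((List.range q).map g).head? = some (g 0) := by
    obtain ⟨q', rfl⟩ : ∃ q', q = q' + 1 := ⟨q - 1, by omega⟩
    rw [List.range_succ_eq_map]
    simp
  have hne1 : ((List.range q).map g).getLast? ≠ some (g q) := by
    rw [hgl]
    intro h
    exact ne_of_len_ne _ _ (by rw [hlenL, hlenT]; omega) (Option.some.inj h)
  have hcsne : (List.range q).map g ≠ [] := by
    intro h; rw [h] at hhd; simp at hhd
  have hne2 : (((List.range q).map g) ++ [g q]).head? ≠ some "" := by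
    rw [List.head?_append_of_ne_nil _ hcsne, hhd]
    intro h
    exact ne_of_len_ne _ _ (by rw [hlenH]; simp; omega) (Option.some.inj h)
  have hT : PySem.Str.len (g q) = (r : Int) := by rw [PySem.Str.len_eq, hlenT]
  unfold innerA chunksB
  rw [hlen]
  simp only [hf']
  rw [← List.foldl_map, hA, hB,
      foldl_stepA,
      F_concat ((List.range q).map g).length ((List.range q).map g) (g q) "" 1 le_rfl hne1 hne2]
  by_cases h0 : r = 0
  · rw [if_pos h0, List.append_nil, hT, h0]
    simp [digitsIf]
  · rw [if_neg h0,
        rleLen_concat ((List.range q).map g).length ((List.range q).map g) (g q) le_rfl hne1, hT]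
    simp [digitsIf]

-- character-shift detection of a chunk boundary equals chunk inequality
lemma chunkNeq_eq (s : String) (X k N : Nat) (hx : 1 ≤ X) (hN : s.toList.length = N)
    (hk : X * k + X + X ≤ N) :
    chunkNeqB s (X : Int) (1 + (k : Int)) = !(gch s X k == gch s X (k + 1)) := by
  have hl1 : (gch s X k).toList = (s.toList.drop (X * k)).take X := chunk_toList s (X * k) X
  have hl2 : (gch s X (k + 1)).toList = (s.toList.drop (X * (k + 1))).take X :=
    chunk_toList s (X * (k + 1)) X
  have hlen1 : ((s.toList.drop (X * k)).take X).length = X := by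
    rw [List.length_take, List.length_drop, hN]
    omega
  have hlen2 : ((s.toList.drop (X * (k + 1))).take X).length = X := by
    rw [List.length_take, List.length_drop, hN, show X * (k + 1) = X * k + X from by ring]
    omega
  have hget1 : ∀ t, t < X → ((s.toList.drop (X * k)).take X)[t]? = s.toList[X * k + t]? := by
    intro t ht
    rw [List.getElem?_take, if_pos ht, List.getElem?_drop]
  have hget2 : ∀ t, t < X →
      ((s.toList.drop (X * (k + 1))).take X)[t]? = s.toList[X * k + t + X]? := by
    intro t ht
    rw [List.getElem?_take, if_pos ht, List.getElem?_drop]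
    congr 1
    ring
  have hEq : gch s X k = gch s X (k + 1)
      ↔ ∀ t, t < X → s.toList[X * k + t]? = s.toList[X * k + t + X]? := by
    rw [← String.toList_inj, hl1, hl2]
    constructor
    · intro h t ht
      rw [← hget1 t ht, ← hget2 t ht, h]
    · intro h
      apply List.ext_getElem (by rw [hlen1, hlen2])
      intro i h1 h2
      have hiX : i < X := by rw [hlen1] at h1; exact h1
      have hh := h i hiX
      rw [← hget1 i hiX, ← hget2 i hiX, List.getElem?_eq_getElem h1,
          List.getElem?_eq_getElem h2] at hh
      exact Option.some.inj hh
  unfold chunkNeqB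
  have e1 : (1 + (k : Int) - 1) * (X : Int) = ((X * k : Nat) : Int) := by push_cast; ring
  have e2 : (1 + (k : Int)) * (X : Int) = ((X * k + X : Nat) : Int) := by push_cast; ring
  rw [e1, e2, PySem.List.pyRange_one]
  have e3 : (((X * k + X : Nat) : Int) - ((X * k : Nat) : Int)).toNat = X := by omega
  rw [e3, List.any_map]
  have hstep : ∀ t : Nat, t < X →
      (((fun i => !(PySem.Str.pyGet? s i == PySem.Str.pyGet? s (i + (X : Int)))) ∘
          (fun t : Nat => ((X * k : Nat) : Int) + (t : Int))) t = true
        ↔ ¬ s.toList[X * k + t]? = s.toList[X * k + t + X]?) := by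
    intro t ht
    simp only [Function.comp_apply]
    rw [show ((X * k : Nat) : Int) + (t : Int) + (X : Int) = ((X * k + t + X : Nat) : Int) from by
          push_cast; ring,
        show ((X * k : Nat) : Int) + (t : Int) = ((X * k + t : Nat) : Int) from by
          push_cast; ring,
        PySem.Str.pyGet?_natCast, PySem.Str.pyGet?_natCast]
    simp
  rw [Bool.eq_iff_iff, List.any_eq_true]
  constructor
  · rintro ⟨t, htm, hcond⟩
    have ht : t < X := List.mem_range.mp htm
    have hm := (hstep t ht).mp hcond
    have hne : gch s X k ≠ gch s X (k + 1) := fun he => hm (hEq.mp he t ht)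
    simpa using hne
  · intro hb
    have hne : gch s X k ≠ gch s X (k + 1) := by simpa using hb
    have hnall : ¬ ∀ t, t < X → s.toList[X * k + t]? = s.toList[X * k + t + X]? :=
      fun hcontra => hne (hEq.mpr hcontra)
    push Not at hnall
    obtain ⟨t, ht, hneq⟩ := hnall
    exact ⟨t, List.mem_range.mpr ht, (hstep t ht).mpr hneq⟩

lemma inner_eq_B (s : String) (X : Nat) (hx : 1 ≤ X) (hxn : 2 * X ≤ s.toList.length) :
    innerB s (X : Int) = rleLen (chunksB s (X : Int)) := by
  have hX0 : (0:Int) < (X:Int) := by exact_mod_cast hx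
  obtain ⟨N, hN⟩ : ∃ N, s.toList.length = N := ⟨_, rfl⟩
  have hlen : PySem.Str.len s = (N : Int) := by rw [PySem.Str.len_eq, hN]
  obtain ⟨q, hq⟩ : ∃ q', N / X = q' := ⟨_, rfl⟩
  obtain ⟨r, hr⟩ : ∃ r', N % X = r' := ⟨_, rfl⟩
  have hdm : X * q + r = N := by rw [← hq, ← hr]; exact Nat.div_add_mod N X
  have hrX : r < X := by rw [← hr]; exact Nat.mod_lt _ (by omega)
  have hq2 : 2 ≤ q := by rw [← hq, Nat.le_div_iff_mul_le (by omega)]; omega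
  obtain ⟨m, hmq⟩ : ∃ m, q = m + 1 := ⟨q - 1, by omega⟩
  have glen : ∀ k : Nat, (gch s X k).toList.length = min (X*k + X) N - X*k := by
    intro k
    rw [gch, chunk_len s (X*k) X, hN]
  have hfdq : PySem.Int.floordiv (N : Int) (X : Int) = (q : Int) := by
    rw [PySem.Int.floordiv_natCast, hq]
  have hmdr : PySem.Int.mod (N : Int) (X : Int) = (r : Int) := by
    rw [PySem.Int.mod_natCast, hr]
  -- the chunk list, with gch as the chunk function
  have hgfun : ∀ c : Nat, PySem.Str.slice s (some ((0:Int) + (X:Int) * (c:Nat)))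
      (some ((0:Int) + (X:Int) * (c:Nat) + (X:Int))) = gch s X c := by
    intro c
    have e : (0:Int) + (X:Int) * ((c:Nat):Int) = ((X*c : Nat) : Int) := by push_cast; ring
    rw [gch, e]
  have hB : chunksB s (X : Int) = (List.range q).map (gch s X)
      ++ (if r = 0 then [] else [gch s X q]) := by
    unfold chunksB
    rw [hlen, PySem.List.pyRange_of_pos 0 (N:Int) hX0, countB N X hx (by omega), hq, hr,
        List.map_map]
    by_cases h0 : r = 0
    · rw [if_pos h0, if_pos h0, List.append_nil, Nat.add_zero]
      apply List.map_congr_left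
      intro c _
      simpa using hgfun c
    · rw [if_neg h0, if_neg h0, List.range_succ, List.map_append]
      congr 1
      · apply List.map_congr_left
        intro c _
        simpa using hgfun c
      · simpa using hgfun q
  have hlenT : (gch s X q).toList.length = r := by rw [glen q]; omega
  have hlenF : ∀ k, k < q → (gch s X k).toList.length = X := by
    intro k hkq
    rw [glen k]
    have hfit : X * k + X ≤ N := by
      have h1 : X * (k + 1) ≤ X * q := Nat.mul_le_mul_left X (by omega)
      have h2 : X * (k + 1) = X * k + X := by ring
      omega
    omega
  have hgl : ((List.range q).map (gch s X)).getLast? = some (gch s X (q-1)) := by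
    obtain ⟨q', rfl⟩ : ∃ q', q = q' + 1 := ⟨q - 1, by omega⟩
    rw [List.range_succ, List.map_append, List.map_singleton, List.getLast?_concat]
    simp
  have hne1 : ((List.range q).map (gch s X)).getLast? ≠ some (gch s X q) := by
    rw [hgl]
    intro h
    exact ne_of_len_ne _ _
      (by rw [hlenF (q-1) (by omega), hlenT]; omega) (Option.some.inj h)
  have hT : PySem.Str.len (gch s X q) = (r : Int) := by rw [PySem.Str.len_eq, hlenT]
  -- reduce innerB to ptsSum over the structural breakpoint list
  have hqm1 : ((q : Int) - 1).toNat = m := by omega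
  have hbrk : (PySem.List.pyRange 1 (q : Int) 1).filter (fun j => chunkNeqB s (X : Int) j)
      = bks ((List.range q).map (gch s X)) 0 := by
    rw [PySem.List.pyRange_one, hqm1, List.filter_map]
    rw [List.filter_congr (fun k hk => by
      simp only [Function.comp_apply]
      exact chunkNeq_eq s X k N hx hN (by
        have hkm : k < m := List.mem_range.mp hk
        have h1 : X * (k + 2) ≤ X * q := Nat.mul_le_mul_left X (by omega)
        have h2 : X * (k + 2) = X * k + X + X := by ring
        omega))]
    rw [hmq, show List.range (m + 1) = List.range' 0 (m + 1) from List.range_eq_range',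
        bks_range' (gch s X) m 0 0]
    have hf : (List.range m).filter (fun k => !(gch s X (0 + k) == gch s X (0 + k + 1)))
        = (List.range m).filter (fun k => !(gch s X k == gch s X (k + 1))) :=
      List.filter_congr (fun k _ => by rw [Nat.zero_add])
    rw [hf]
    apply List.map_congr_left
    intro k _
    ring
  have hcsl : (((List.range q).map (gch s X)).length : Int) = (q : Int) := by simp
  have hcore : ptsSum (X : Int) 0
        (bks ((List.range q).map (gch s X)) 0 ++ [(q : Int)])
      = rleLen ((List.range q).map (gch s X)) := by
    rw [← hcsl]
    apply core (X : Int) ((List.range q).map (gch s X)).length _ le_rfl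
    · simp [hmq]
    · intro c hc
      obtain ⟨k, hk, rfl⟩ := List.mem_map.mp hc
      rw [PySem.Str.len_eq, hlenF k (List.mem_range.mp hk)]
  -- unfold innerB and assemble
  simp only [innerB]
  simp only [hlen, hfdq, hmdr]
  rw [PySem.List.slice_from _ (by norm_num)]
  rw [show ((1:Int)).toNat = 1 from rfl]
  rw [show ((0 : Int) :: ((PySem.List.pyRange 1 (q:Int) 1).filter
        (fun j => chunkNeqB s (X:Int) j) ++ [(q:Int)])).drop 1
      = (PySem.List.pyRange 1 (q:Int) 1).filter (fun j => chunkNeqB s (X:Int) j) ++ [(q:Int)]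
    from rfl]
  rw [sum_zip_eq_ptsSum, hbrk, hcore, hB]
  by_cases h0 : r = 0
  · rw [if_pos h0, h0, List.append_nil]
    simp
  · rw [if_neg h0,
        rleLen_concat ((List.range q).map (gch s X)).length _ _ le_rfl hne1, hT]
    ring

-- ===== VERDICT (by name: the statement is the Claim_ definition above) =====
theorem solution_spec : Claim_equal_solution := by
  intro s _
  unfold Spec_solution solution solution_alt
  apply PySem.List.foldl_congr_mem
  intro acc x hx
  rw [PySem.List.mem_pyRange_one] at hx
  have hfd : PySem.Int.floordiv (PySem.Str.len s) 2 = ((s.toList.length / 2 : Nat) : Int) := by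
    rw [PySem.Str.len_eq]; exact_mod_cast PySem.Int.floordiv_natCast s.toList.length 2
  rw [hfd] at hx
  obtain ⟨hx1, hx2⟩ := hx
  lift x to ℕ using (by omega) with X
  have h2 : 2 * X ≤ s.toList.length := by
    have hX : X ≤ s.toList.length / 2 := by exact_mod_cast (by omega : (X : Int) ≤ ((s.toList.length / 2 : Nat) : Int))
    omega
  rw [inner_eq_B s X (by exact_mod_cast hx1) h2,
      ← inner_eq s X (by exact_mod_cast hx1) h2, min_def]
  split_ifs <;> omega
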